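-- pv_equiv track=rewrite | github.com/QAGIw3/aurum | src/aurum/external/providers/isone.py | _deduplicate_nodes
-- ===== SOURCE A (Python) =====
-- from typing import Any, Dict, List, Optional, Set
--
-- def _deduplicate_nodes(nodes: List[str]) -> List[Dict[str, Any]]:
--     """Deduplicate nodes and create crosswalk entries."""
--     unique_nodes = {}
--     for node in nodes:
--         if node not in unique_nodes:
--             unique_nodes[node] = {
--                 "iso": "ISO-NE",
--                 "location_id": node,
--                 "location_name": node,
--                 "location_type": "NODE",
--                 "zone": node,
--                 "hub": "",
--                 "timezone": "America/New_York"
--             }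
--
--     return list(unique_nodes.values())
-- ===== SOURCE B (Python) =====
-- def _deduplicate_nodes(nodes):
--     """Deduplicate nodes and create crosswalk entries."""
--     result = []
--     rest = list(nodes)
--     while rest:
--         head = rest[0]
--         result.append({
--             "iso": "ISO-NE",
--             "location_id": head,
--             "location_name": head,
--             "location_type": "NODE",
--             "zone": head,
--             "hub": "",
--             "timezone": "America/New_York",
--         })
--         rest = [n for n in rest[1:] if n != head]
--     return result
-- ===== Notes on version B (the rewrite author's own statement) =====
-- stated objective: alternative
-- what changed: Replaces the dict-of-entries membership loop with a selection-style dedup: repeatedly take the first remaining name, emit its entry, and filter all its duplicates out of the remainder (no dict or membership set at all).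
import Mathlib
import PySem

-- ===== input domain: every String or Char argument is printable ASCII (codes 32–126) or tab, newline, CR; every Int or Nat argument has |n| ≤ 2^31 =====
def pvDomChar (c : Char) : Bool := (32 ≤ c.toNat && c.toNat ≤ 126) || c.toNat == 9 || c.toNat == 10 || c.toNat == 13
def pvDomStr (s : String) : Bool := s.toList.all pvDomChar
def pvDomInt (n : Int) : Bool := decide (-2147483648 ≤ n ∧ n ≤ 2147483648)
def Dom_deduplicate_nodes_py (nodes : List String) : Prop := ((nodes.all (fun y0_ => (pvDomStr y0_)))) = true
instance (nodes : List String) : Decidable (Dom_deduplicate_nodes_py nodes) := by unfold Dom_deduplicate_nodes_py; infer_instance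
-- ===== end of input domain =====

-- B deduplicates by repeatedly emitting the first remaining name and filtering its duplicates out of the rest, instead of A's dict-of-entries membership loop; objective: alternative algorithm, same results.


-- ===== PORT A =====
-- the crosswalk entry built for one node name (A's dict literal, as an assoc list)
def pvEntry (node : String) : List (String × String) :=
  [("iso", "ISO-NE"), ("location_id", node), ("location_name", node),
   ("location_type", "NODE"), ("zone", node), ("hub", ""), ("timezone", "America/New_York")]

def deduplicate_nodes_py (nodes : List String) : List (List (String × String)) :=
  (nodes.foldl
    (fun (d : PySem.Dict String (List (String × String))) node =>
      if d.contains node then d else d.insert node (pvEntry node))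
    PySem.Dict.empty).values

-- ===== PORT B =====
-- B's while loop: state = (result, rest); each round appends head's entry and filters head out of the rest
def pvLoopB (result : List (List (String × String))) : List String → List (List (String × String))
  | [] => result
  | head :: t =>
      pvLoopB (result ++ [[("iso", "ISO-NE"), ("location_id", head), ("location_name", head),
        ("location_type", "NODE"), ("zone", head), ("hub", ""),
        ("timezone", "America/New_York")]]) (t.filter (fun n => n != head))
termination_by l => l.length
decreasing_by simpa using Nat.lt_succ_of_le (List.length_filter_le _ t)

def deduplicate_nodes_py_alt (nodes : List String) : List (List (String × String)) :=
  pvLoopB [] nodes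

-- ===== PRECONDITION & SPEC =====
def Spec_deduplicate_nodes_py (nodes : List String) (out : List (List (String × String))) : Prop := out = deduplicate_nodes_py_alt nodes
instance (nodes : List String) (out : List (List (String × String))) : Decidable (Spec_deduplicate_nodes_py nodes out) := by unfold Spec_deduplicate_nodes_py; infer_instance

-- ===== CLAIM (what is proved, stated in full; the proofs are below) =====
def Claim_equal_deduplicate_nodes_py : Prop := ∀ (nodes : List String), Dom_deduplicate_nodes_py nodes → Spec_deduplicate_nodes_py nodes (deduplicate_nodes_py nodes)

-- ===== LEMMAS AND PROOFS =====

-- invariant of A's loop: if the accumulator's items are exactly the entries for the names in s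
-- (first occurrences seen so far), the values of the final dict are the entries for Set.update s l
theorem pv_loop_values (l : List String) : ∀ (s : List String)
    (d : PySem.Dict String (List (String × String))),
    d.items = s.map (fun n => (n, pvEntry n)) →
    (l.foldl
      (fun (d : PySem.Dict String (List (String × String))) node =>
        if d.contains node then d else d.insert node (pvEntry node)) d).values
      = (PySem.Set.update s l).map pvEntry := by
  induction l with
  | nil =>
      intro s d h
      simp only [List.foldl_nil, PySem.Dict.values, h, List.map_map, PySem.Set.update,
        List.foldl_nil]
      rfl
  | cons x l ih =>
      intro s d h
      have hkeys : d.keys = s := by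
        simp only [PySem.Dict.keys, h, List.map_map]
        exact List.map_id'' (fun _ => rfl) s
      have hcont : d.contains x = decide (x ∈ s) := by
        rw [PySem.Dict.contains_eq_decide_mem_keys, hkeys]
      simp only [List.foldl_cons, PySem.Set.update, List.foldl_cons]
      by_cases hx : x ∈ s
      · have hadd : PySem.Set.add s x = s := by
          simp [PySem.Set.add, PySem.Set.contains, hx]
        rw [hcont]
        simp only [hx, decide_true, if_true]
        have := ih s d h
        simpa [PySem.Set.update, hadd] using this
      · have hadd : PySem.Set.add s x = s ++ [x] := by
          simp [PySem.Set.add, PySem.Set.contains, hx]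
        rw [hcont]
        simp only [hx, decide_false]
        have hitems : (d.insert x (pvEntry x)).items = (s ++ [x]).map (fun n => (n, pvEntry n)) := by
          rw [PySem.Dict.items_insert_of_not_contains]
          · simp [h]
          · rw [hcont]; simp [hx]
        have := ih (s ++ [x]) _ hitems
        simpa [PySem.Set.update, hadd] using this

-- filtering out an already-seen element does not change Set.update
theorem pv_update_filter (x : String) (l : List String) : ∀ (s : List String), x ∈ s →
    PySem.Set.update s l = PySem.Set.update s (l.filter (fun n => n != x)) := by
  induction l with
  | nil => intro s _; rfl
  | cons y l ih =>
      intro s hx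
      by_cases hyx : y = x
      · subst hyx
        have hset : PySem.Set.add s y = s := by simp [PySem.Set.add, PySem.Set.contains, hx]
        have hf : List.filter (fun n => n != y) (y :: l) = l.filter (fun n => n != y) := by simp
        simp only [PySem.Set.update, List.foldl_cons, hf, hset]
        exact ih s hx
      · simp only [PySem.Set.update, List.foldl_cons, List.filter_cons]
        have : (y != x) = true := by simp [hyx]
        rw [this]
        simp only [if_true]
        have hx' : x ∈ PySem.Set.add s y := by
          simp [PySem.Set.add, PySem.Set.contains]; split <;> simp [hx]
        exact ih _ hx'

-- an element no member of l equals can be pulled out of the set state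
theorem pv_update_cons (x : String) (l : List String) : ∀ (s : List String),
    (∀ y ∈ l, y ≠ x) → PySem.Set.update (x :: s) l = x :: PySem.Set.update s l := by
  induction l with
  | nil => intro s _; rfl
  | cons y l ih =>
      intro s h
      have hyx : y ≠ x := h y (by simp)
      simp only [PySem.Set.update, List.foldl_cons]
      have hc : PySem.Set.contains (x :: s) y = PySem.Set.contains s y := by
        simp [PySem.Set.contains, fun hh => hyx (by simpa using hh)]
      have : PySem.Set.add (x :: s) y =
          x :: PySem.Set.add s y := by
        simp only [PySem.Set.add, hc]; split <;> simp
      rw [this]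
      exact ih _ (fun z hz => h z (by simp [hz]))

-- B's loop computes result ++ the entries of the keep-first dedup
theorem pv_loopB_eq (n : Nat) : ∀ (l : List String), l.length ≤ n → ∀ result,
    pvLoopB result l = result ++ (PySem.List.dedup l).map pvEntry := by
  induction n with
  | zero =>
      intro l hl result
      have : l = [] := List.eq_nil_of_length_eq_zero (Nat.le_zero.mp hl)
      subst this; simp [pvLoopB, PySem.List.dedup, PySem.Set.ofList]
  | succ n ih =>
      intro l hl result
      match l with
      | [] => simp [pvLoopB, PySem.List.dedup, PySem.Set.ofList]
      | x :: t =>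
          have hlen : (t.filter (fun m => m != x)).length ≤ n := by
            have := List.length_filter_le (fun m => m != x) t
            simp at hl; omega
          have hded : PySem.List.dedup (x :: t)
              = x :: PySem.List.dedup (t.filter (fun m => m != x)) := by
            show PySem.Set.ofList (x :: t) = x :: PySem.Set.ofList (t.filter (fun m => m != x))
            simp only [PySem.Set.ofList, List.foldl_cons]
            have hadd : PySem.Set.empty.add x = [x] := rfl
            rw [hadd]
            show PySem.Set.update [x] t = x :: PySem.Set.update [] (t.filter (fun m => m != x))
            rw [pv_update_filter x t [x] (by simp)]
            exact pv_update_cons x _ [] (fun y hy => by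
              have := List.of_mem_filter hy; simpa using this)
          rw [pvLoopB, ih _ hlen, hded]
          simp [pvEntry]

theorem deduplicate_nodes_py_eq (nodes : List String) :
    deduplicate_nodes_py nodes = deduplicate_nodes_py_alt nodes := by
  unfold deduplicate_nodes_py deduplicate_nodes_py_alt
  have h := pv_loop_values nodes [] PySem.Dict.empty (by rfl)
  rw [h, pv_loopB_eq nodes.length nodes (le_refl _) []]
  simp [PySem.List.dedup, PySem.Set.ofList]
  rfl

-- ===== VERDICT (by name: the statement is the Claim_ definition above) =====
theorem deduplicate_nodes_py_spec : Claim_equal_deduplicate_nodes_py := by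
  intro nodes _
  exact deduplicate_nodes_py_eq nodes
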